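-- pv_equiv track=rewrite | github.com/bjrnwnklr/AoC2020 | 16/aoc2020_16.py | solve_part1_sets
-- ===== SOURCE A (Python) =====
-- def solve_part1_sets(rules, flat_nearby_tickets):
--     # Part 1:
--     # - create ranges of the valid values in all fields
--     # - check which number is in none of the ranges by using sets
--     all_valid_ranges = []
--
--     for v in rules.values():
--         rules_ranges = set()
--         for low, hi in v:
--             rules_ranges |= {*range(low, hi + 1)}
--         all_valid_ranges.append(rules_ranges)
--
--     # now check each number from nearby tickets against all the ranges
--     invalid_nums = []
--     for n in flat_nearby_tickets:
--         if all(n not in r for r in all_valid_ranges):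
--             invalid_nums.append(n)
--
--     return invalid_nums
-- ===== SOURCE B (Python) =====
-- def solve_part1_sets(rules, flat_nearby_tickets):
--     # Merge all rule ranges into sorted disjoint intervals instead of
--     # materializing every integer in them; test numbers by comparison.
--     intervals = sorted(((lo, hi) for v in rules.values() for lo, hi in v if lo <= hi),
--                        key=lambda t: t[0])
--     merged = []
--     for lo, hi in intervals:
--         if merged and lo <= merged[-1][1] + 1:
--             merged[-1] = (merged[-1][0], max(merged[-1][1], hi))
--         else:
--             merged.append((lo, hi))
--     return [n for n in flat_nearby_tickets
--             if not any(lo <= n <= hi for lo, hi in merged)]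
-- ===== Notes on version B (the rewrite author's own statement) =====
-- stated objective: faster
-- what changed: Instead of materializing every integer of every rule range into per-rule sets, B sorts the (lo,hi) interval endpoints, merges them into disjoint intervals, and tests each ticket number by arithmetic comparison against the merged intervals.
import Mathlib
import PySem

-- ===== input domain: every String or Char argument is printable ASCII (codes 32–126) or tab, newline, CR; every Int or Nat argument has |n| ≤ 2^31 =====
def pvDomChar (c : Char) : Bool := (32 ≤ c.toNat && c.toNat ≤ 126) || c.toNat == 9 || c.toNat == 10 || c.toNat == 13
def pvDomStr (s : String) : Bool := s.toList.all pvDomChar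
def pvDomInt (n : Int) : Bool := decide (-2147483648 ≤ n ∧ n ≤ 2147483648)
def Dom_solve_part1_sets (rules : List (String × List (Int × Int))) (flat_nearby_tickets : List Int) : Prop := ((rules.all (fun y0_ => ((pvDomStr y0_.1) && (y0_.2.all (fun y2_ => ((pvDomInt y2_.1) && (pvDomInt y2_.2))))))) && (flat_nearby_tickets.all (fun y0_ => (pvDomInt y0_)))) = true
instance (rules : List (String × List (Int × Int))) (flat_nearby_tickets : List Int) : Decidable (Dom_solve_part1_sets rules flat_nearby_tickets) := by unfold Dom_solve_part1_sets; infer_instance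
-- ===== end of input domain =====

-- B merges the rule ranges into sorted disjoint intervals and tests each number by
-- comparison, instead of materializing every integer of every range into per-rule sets.

-- ===== PORT A =====
def solve_part1_sets (rules : List (String × List (Int × Int))) (flat_nearby_tickets : List Int) : List Int :=
  -- all_valid_ranges: one set per rule, union of all its ranges
  let all_valid_ranges : List (List Int) :=
    ((PySem.Dict.ofList rules).values).foldl
      (fun acc v =>
        acc ++ [v.foldl (fun s p => PySem.Set.union s (PySem.List.pyRange p.1 (p.2 + 1) 1))
                  (PySem.Set.ofList ([] : List Int))]) []
  flat_nearby_tickets.foldl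
    (fun inv n =>
      if all_valid_ranges.all (fun r => !(decide (n ∈ r))) then inv ++ [n] else inv) []

-- ===== PORT B =====
-- one step of B's interval-merging loop; merged is kept in REVERSE order
-- (head = Python's merged[-1]) and reversed at the end
def pvMergeStep (acc : List (Int × Int)) (iv : Int × Int) : List (Int × Int) :=
  match acc with
  | (a, b) :: rest => if iv.1 ≤ b + 1 then (a, max b iv.2) :: rest else iv :: (a, b) :: rest
  | [] => [iv]

def solve_part1_sets_alt (rules : List (String × List (Int × Int))) (flat_nearby_tickets : List Int) : List Int :=
  let intervals : List (Int × Int) :=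
    PySem.List.sorted
      (((PySem.Dict.ofList rules).values).flatMap (fun v => v.filter (fun p => decide (p.1 ≤ p.2))))
      (fun t => t.1) false
  let merged : List (Int × Int) := (intervals.foldl pvMergeStep []).reverse
  flat_nearby_tickets.filter
    (fun n => !(merged.any (fun p => decide (p.1 ≤ n) && decide (n ≤ p.2))))

-- ===== PRECONDITION & SPEC =====
def Spec_solve_part1_sets (rules : List (String × List (Int × Int))) (flat_nearby_tickets : List Int) (out : List Int) : Prop := out = solve_part1_sets_alt rules flat_nearby_tickets
instance (rules : List (String × List (Int × Int))) (flat_nearby_tickets : List Int) (out : List Int) : Decidable (Spec_solve_part1_sets rules flat_nearby_tickets out) := by unfold Spec_solve_part1_sets; infer_instance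

-- ===== CLAIM (what is proved, stated in full; the proofs are below) =====
def Claim_equal_solve_part1_sets : Prop := ∀ (rules : List (String × List (Int × Int))) (flat_nearby_tickets : List Int), Dom_solve_part1_sets rules flat_nearby_tickets → Spec_solve_part1_sets rules flat_nearby_tickets (solve_part1_sets rules flat_nearby_tickets)

-- ===== LEMMAS AND PROOFS =====

-- propositional shuffle used in the merge lemma (kept abstract so no list term is unfolded)
theorem pvOrShuffle (P Q R S : Prop) : P ∨ (Q ∨ (R ∨ S)) ↔ (Q ∨ P) ∨ (R ∨ S) := by tauto

-- "n is covered by some interval of l"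
def pvCov (l : List (Int × Int)) (n : Int) : Prop := ∃ p ∈ l, p.1 ≤ n ∧ n ≤ p.2

theorem pvCov_nil (n : Int) : ¬ pvCov [] n := by simp [pvCov]

theorem pvCov_cons (p : Int × Int) (l : List (Int × Int)) (n : Int) :
    pvCov (p :: l) n ↔ (p.1 ≤ n ∧ n ≤ p.2) ∨ pvCov l n := by
  simp [pvCov]

-- membership in A's per-rule set
theorem pvMem_rule_set (v : List (Int × Int)) (s : List Int) (n : Int) :
    n ∈ v.foldl (fun s p => PySem.Set.union s (PySem.List.pyRange p.1 (p.2 + 1) 1)) s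
      ↔ n ∈ s ∨ pvCov v n := by
  induction v generalizing s with
  | nil => simp [pvCov]
  | cons p t ih =>
      rw [List.foldl_cons, ih, pvCov_cons]
      rw [PySem.Set.mem_union, PySem.List.mem_pyRange_one]
      have h : (p.1 ≤ n ∧ n < p.2 + 1) ↔ (p.1 ≤ n ∧ n ≤ p.2) := by omega
      rw [h]
      tauto

-- B's merging loop preserves point coverage
theorem pvMerge_pres (l : List (Int × Int)) (n : Int) :
    ∀ acc : List (Int × Int),
    (∀ p ∈ l, p.1 ≤ p.2) →
    (∀ p ∈ acc, p.1 ≤ p.2) →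
    l.Pairwise (fun a b => a.1 ≤ b.1) →
    (∀ q, acc.head? = some q → ∀ p ∈ l, q.1 ≤ p.1) →
    (pvCov (l.foldl pvMergeStep acc) n ↔ pvCov l n ∨ pvCov acc n) := by
  induction l with
  | nil => intro acc _ _ _ _; simp [pvCov]
  | cons c t ih =>
      intro acc hl hacc hsort hhd
      have hct : ∀ p ∈ t, c.1 ≤ p.1 := fun p hp => (List.pairwise_cons.mp hsort).1 p hp
      have hsort' := (List.pairwise_cons.mp hsort).2
      have hcd : c.1 ≤ c.2 := hl c (List.mem_cons_self ..)
      have hl' : ∀ p ∈ t, p.1 ≤ p.2 := fun p hp => hl p (List.mem_cons_of_mem _ hp)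
      match acc with
      | [] =>
          rw [List.foldl_cons]
          have := ih [c] hl' (by simpa using hcd) hsort'
            (by intro q hq p hp; simp at hq; subst hq; exact hct p hp)
          simp only [pvMergeStep] at this ⊢
          have h1 : pvCov [c] n ↔ (c.1 ≤ n ∧ n ≤ c.2) := by
            rw [pvCov_cons]; simp [pvCov]
          have h0 := pvCov_nil n
          rw [this, h1, pvCov_cons]
          tauto
      | (a, b) :: rest =>
          have hab : a ≤ b := by simpa using hacc (a, b) (List.mem_cons_self ..)
          have hac : a ≤ c.1 := hhd (a, b) rfl c (List.mem_cons_self ..)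
          rw [List.foldl_cons]
          by_cases hcb : c.1 ≤ b + 1
          · have hstep : pvMergeStep ((a, b) :: rest) c = (a, max b c.2) :: rest := by
              simp [pvMergeStep, hcb]
            rw [hstep]
            have := ih ((a, max b c.2) :: rest)
              hl'
              (by intro p hp
                  rcases List.mem_cons.mp hp with h | h
                  · subst h; simp; omega
                  · exact hacc p (List.mem_cons_of_mem _ h))
              hsort'
              (by intro q hq p hp; simp at hq; subst hq
                  exact le_trans hac (hct p hp))
            rw [this, pvCov_cons, pvCov_cons, pvCov_cons]
            simp only
            have hiv : (a ≤ n ∧ n ≤ max b c.2) ↔ ((c.1 ≤ n ∧ n ≤ c.2) ∨ (a ≤ n ∧ n ≤ b)) := by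
              omega
            rw [hiv]
            tauto
          · have hstep : pvMergeStep ((a, b) :: rest) c = c :: (a, b) :: rest := by
              simp [pvMergeStep, hcb]
            rw [hstep]
            have := ih (c :: (a, b) :: rest)
              hl'
              (by intro p hp
                  rcases List.mem_cons.mp hp with h | h
                  · subst h; exact hcd
                  · exact hacc p h)
              hsort'
              (by intro q hq p hp; simp at hq; subst hq; exact hct p hp)
            rw [this, pvCov_cons, pvCov_cons, pvCov_cons]
            exact pvOrShuffle _ _ _ _

theorem pvCov_perm {l l' : List (Int × Int)} (h : l.Perm l') (n : Int) :
    pvCov l n ↔ pvCov l' n := by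
  unfold pvCov
  constructor <;> rintro ⟨p, hp, h1, h2⟩
  · exact ⟨p, h.mem_iff.mp hp, h1, h2⟩
  · exact ⟨p, h.mem_iff.mpr hp, h1, h2⟩

theorem pvCov_flatMap (vals : List (List (Int × Int))) (n : Int) :
    pvCov (vals.flatMap (fun v => v.filter (fun p => decide (p.1 ≤ p.2)))) n
      ↔ ∃ v ∈ vals, pvCov v n := by
  unfold pvCov
  constructor
  · rintro ⟨p, hp, h1, h2⟩
    rcases List.mem_flatMap.mp hp with ⟨v, hv, hpv⟩
    exact ⟨v, hv, p, (List.mem_filter.mp hpv).1, h1, h2⟩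
  · rintro ⟨v, hv, p, hp, h1, h2⟩
    exact ⟨p, List.mem_flatMap.mpr ⟨v, hv, List.mem_filter.mpr ⟨hp, by simp; omega⟩⟩, h1, h2⟩

-- per-number agreement of the two tests
theorem pvPointwise (vals : List (List (Int × Int))) (n : Int) :
    ((vals.foldl
        (fun acc v =>
          acc ++ [v.foldl (fun s p => PySem.Set.union s (PySem.List.pyRange p.1 (p.2 + 1) 1))
                    (PySem.Set.ofList ([] : List Int))]) []).all (fun r => !(decide (n ∈ r))))
      = (!(((((PySem.List.sorted
            (vals.flatMap (fun v => v.filter (fun p => decide (p.1 ≤ p.2))))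
            (fun t => t.1) false)).foldl pvMergeStep []).reverse).any
              (fun p => decide (p.1 ≤ n) && decide (n ≤ p.2)))) := by
  set flat := vals.flatMap (fun v => v.filter (fun p => decide (p.1 ≤ p.2))) with hflat
  set srt := PySem.List.sorted flat (fun t => t.1) false with hsrt
  have hperm : srt.Perm flat := PySem.List.sorted_perm ..
  have hne : ∀ p ∈ srt, p.1 ≤ p.2 := by
    intro p hp
    have : p ∈ flat := hperm.mem_iff.mp hp
    rcases List.mem_flatMap.mp this with ⟨v, _, hpv⟩
    have := (List.mem_filter.mp hpv).2
    simpa using this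
  have hpw : srt.Pairwise (fun a b => a.1 ≤ b.1) := PySem.List.sorted_pairwise ..
  have hmerge := pvMerge_pres srt n [] hne (by simp) hpw (by simp)
  have hA : (vals.foldl
        (fun acc v =>
          acc ++ [v.foldl (fun s p => PySem.Set.union s (PySem.List.pyRange p.1 (p.2 + 1) 1))
                    (PySem.Set.ofList ([] : List Int))]) [])
      = vals.map (fun v => v.foldl (fun s p => PySem.Set.union s (PySem.List.pyRange p.1 (p.2 + 1) 1))
                    (PySem.Set.ofList ([] : List Int))) := by
    rw [PySem.List.foldl_append_singleton_eq_map]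
    simp only [List.nil_append]
  rw [hA]
  by_cases hc : (((srt.foldl pvMergeStep []).reverse).any
      (fun p => decide (p.1 ≤ n) && decide (n ≤ p.2))) = true
  · -- n is covered by a merged interval ⇒ some rule set contains n ⇒ A's all-test is false
    rw [hc, Bool.not_true, List.all_eq_false]
    rw [List.any_eq_true] at hc
    rcases hc with ⟨p, hp, hpn⟩
    have hcov : pvCov srt n := by
      have hfold : pvCov (srt.foldl pvMergeStep []) n := by
        refine ⟨p, by simpa using hp, ?_, ?_⟩ <;> simp at hpn <;> omega
      rcases hmerge.mp hfold with h | h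
      · exact h
      · exact absurd h (pvCov_nil n)
    have hex : ∃ v ∈ vals, pvCov v n := by
      rw [← pvCov_flatMap, ← hflat, ← pvCov_perm hperm n]
      exact hcov
    rcases hex with ⟨v, hv, hcv⟩
    refine ⟨_, List.mem_map.mpr ⟨v, hv, rfl⟩, ?_⟩
    have hmem : n ∈ v.foldl (fun s p => PySem.Set.union s (PySem.List.pyRange p.1 (p.2 + 1) 1))
        (PySem.Set.ofList ([] : List Int)) := (pvMem_rule_set v _ n).mpr (Or.inr hcv)
    simp only [decide_eq_true hmem, Bool.not_true]
    simp
  · -- n is covered by no merged interval ⇒ no rule set contains n ⇒ A's all-test is true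
    have hany : (((srt.foldl pvMergeStep []).reverse).any
        (fun p => decide (p.1 ≤ n) && decide (n ≤ p.2))) = false := by simpa using hc
    rw [hany, Bool.not_false, List.all_eq_true]
    intro r hr
    rcases List.mem_map.mp hr with ⟨v, hv, rfl⟩
    have hnotcov : ¬ pvCov srt n := by
      intro hcv
      have hfold : pvCov (srt.foldl pvMergeStep []) n := hmerge.mpr (Or.inl hcv)
      rcases hfold with ⟨p, hp, h1, h2⟩
      rw [List.any_eq_false] at hany
      have := hany p (by simpa using hp)
      simp at this
      omega
    have hnm : ¬ (n ∈ v.foldl (fun s p => PySem.Set.union s (PySem.List.pyRange p.1 (p.2 + 1) 1))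
        (PySem.Set.ofList ([] : List Int))) := by
      rw [pvMem_rule_set]
      rintro (h | h)
      · simp at h
      · exact hnotcov (by rw [pvCov_perm hperm n, hflat, pvCov_flatMap]; exact ⟨v, hv, h⟩)
    simp only [decide_eq_false hnm, Bool.not_false]

-- ===== VERDICT (by name: the statement is the Claim_ definition above) =====
theorem solve_part1_sets_spec : Claim_equal_solve_part1_sets := by
  intro rules nums _
  unfold Spec_solve_part1_sets solve_part1_sets solve_part1_sets_alt
  rw [PySem.List.foldl_append_if_eq_filter]
  rw [List.nil_append]
  apply List.filter_congr
  intro n _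
  exact pvPointwise ((PySem.Dict.ofList rules).values) n
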